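-- pv_equiv track=rewrite | github.com/BigSlikTobi/tackle_4_loss_intelligence | src/functions/data_loading/core/data/loaders/player/depth_charts.py | _format_team_summary
-- ===== SOURCE A (Python) =====
-- from collections import defaultdict
-- from typing import Any, Dict, Iterable, List, Optional, Set, Tuple
--
-- def _format_team_summary(
--     summary_rows: List[Tuple[str, str, str, str]],
--     version_map: Dict[Tuple[Any, Any, Any], int],
-- ) -> List[str]:
--     """Build a human-readable per-team rollup of starters and entry counts."""
--
--     if not summary_rows:
--         return []
--
--     # Group entries per team: total count + starter at key positions.
--     starter_positions = ("QB", "RB", "WR", "TE")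
--     per_team: Dict[str, Dict[str, Any]] = defaultdict(
--         lambda: {"count": 0, "starters": {}}
--     )
--     for team, pos_abb, pos_rank, player_name in summary_rows:
--         stats = per_team[team]
--         stats["count"] += 1
--         if pos_rank == "1" and pos_abb in starter_positions:
--             stats["starters"].setdefault(pos_abb, player_name)
--
--     version_by_team = {
--         team: version for (_season, _week, team), version in version_map.items()
--     }
--
--     lines: List[str] = [
--         f"Loaded {len(per_team)} team(s), {len(summary_rows)} entries:"
--     ]
--     for team in sorted(per_team):
--         stats = per_team[team]
--         starters = stats["starters"]
--         cells = [
--             f"{pos}1 {starters[pos]}" for pos in starter_positions if pos in starters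
--         ]
--         version = version_by_team.get(team)
--         version_tag = f" v{version}" if version is not None else ""
--         cells_str = "  ".join(cells) if cells else "(no rank-1 entries)"
--         lines.append(f"  {team:<4}{version_tag:<4} {cells_str}  ({stats['count']} entries)")
--     return lines
-- ===== SOURCE B (Python) =====
-- def _format_team_summary(summary_rows, version_map):
--     """Per-team rollup: sorted distinct teams, then per team a filter pass
--     (count = len of the team's rows, starters = first rank-1 per key position)."""
--     if not summary_rows:
--         return []
--
--     starter_positions = ("QB", "RB", "WR", "TE")
--     teams = sorted(set(t for t, _, _, _ in summary_rows))
--     version_by_team = {team: v for (_s, _w, team), v in version_map.items()}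
--
--     lines = [f"Loaded {len(teams)} team(s), {len(summary_rows)} entries:"]
--     for team in teams:
--         rows = [r for r in summary_rows if r[0] == team]
--         starters = {}
--         for _t, pos_abb, pos_rank, player_name in rows:
--             if pos_rank == "1" and pos_abb in starter_positions and pos_abb not in starters:
--                 starters[pos_abb] = player_name
--         cells = [f"{pos}1 {starters[pos]}" for pos in starter_positions if pos in starters]
--         version = version_by_team.get(team)
--         version_tag = f" v{version}" if version is not None else ""
--         cells_str = "  ".join(cells) if cells else "(no rank-1 entries)"
--         lines.append(f"  {team:<4}{version_tag:<4} {cells_str}  ({len(rows)} entries)")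
--     return lines
-- ===== Notes on version B (the rewrite author's own statement) =====
-- stated objective: alternative
-- what changed: Replaced A's single-pass defaultdict grouping (then a separate sorted() over the dict) by computing sorted(set(teams)) up front and doing a per-team filter pass that counts the team's rows and picks starters with a guarded dict insert instead of setdefault.
import Mathlib
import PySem

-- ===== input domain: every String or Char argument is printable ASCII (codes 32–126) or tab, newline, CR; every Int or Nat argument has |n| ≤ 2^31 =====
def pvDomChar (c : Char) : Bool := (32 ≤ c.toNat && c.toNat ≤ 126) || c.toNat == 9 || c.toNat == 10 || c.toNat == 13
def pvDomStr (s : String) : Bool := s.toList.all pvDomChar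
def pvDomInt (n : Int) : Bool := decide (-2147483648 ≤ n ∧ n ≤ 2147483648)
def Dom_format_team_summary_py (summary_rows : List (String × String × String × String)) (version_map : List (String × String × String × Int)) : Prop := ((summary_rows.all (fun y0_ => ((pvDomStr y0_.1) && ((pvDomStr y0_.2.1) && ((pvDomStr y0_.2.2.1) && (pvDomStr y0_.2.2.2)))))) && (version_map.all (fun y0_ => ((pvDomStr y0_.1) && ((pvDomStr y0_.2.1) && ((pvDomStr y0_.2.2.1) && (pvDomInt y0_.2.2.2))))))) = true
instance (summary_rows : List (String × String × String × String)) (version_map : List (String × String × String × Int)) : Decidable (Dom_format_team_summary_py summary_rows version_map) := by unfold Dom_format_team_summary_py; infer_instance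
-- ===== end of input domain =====

-- B replaces A's single dict-grouping pass by sorted(set(teams)) followed by a per-team
-- filter pass (alternative decomposition; same observable result).

-- ===== PORT A =====
-- the module-level tuple ("QB", "RB", "WR", "TE"), used as a membership test by both versions
def starterPositions : List String := ["QB", "RB", "WR", "TE"]

-- f"{s:<4}" — left-justify to width 4 with spaces; hand-ported (no PySem primitive), exact:
-- Python pads with ' ' on the right up to 4 characters
def pyLjust4 (s : String) : String := String.ofList (s.toList ++ List.replicate (4 - s.toList.length) ' ')

def format_team_summary_py (summary_rows : List (String × String × String × String)) (version_map : List (String × String × String × Int)) : List String :=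
  if summary_rows = [] then []
  else
    -- per_team: defaultdict team ↦ (count, starters); one pass over summary_rows
    let per_team : PySem.Dict String (Int × PySem.Dict String String) :=
      summary_rows.foldl (fun d r =>
        d.modify r.1 (0, PySem.Dict.empty) (fun stats =>
          (stats.1 + 1,
           if r.2.2.1 == "1" && starterPositions.contains r.2.1 then
             stats.2.setdefault r.2.1 r.2.2.2
           else stats.2))) PySem.Dict.empty
    let version_by_team : PySem.Dict String Int :=
      version_map.foldl (fun d q => d.insert q.2.2.1 q.2.2.2) PySem.Dict.empty
    let header : String :=
      "Loaded " ++ PySem.Int.toStr (per_team.size : Int) ++ " team(s), " ++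
        PySem.Int.toStr (summary_rows.length : Int) ++ " entries:"
    let body : List String :=
      (PySem.List.sorted per_team.keys (fun x => x) false).map (fun team =>
        let stats := per_team.getD team (0, PySem.Dict.empty)
        let starters := stats.2
        let cells := (starterPositions.filter (fun p => starters.contains p)).map
          (fun p => p ++ "1 " ++ starters.getD p "")
        let version_tag := match version_by_team.get? team with
          | some v => " v" ++ PySem.Int.toStr v
          | none => ""
        let cells_str := if cells = [] then "(no rank-1 entries)" else PySem.Str.join "  " cells
        "  " ++ pyLjust4 team ++ pyLjust4 version_tag ++ " " ++ cells_str ++ "  (" ++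
          PySem.Int.toStr stats.1 ++ " entries)")
    header :: body

-- ===== PORT B =====
def format_team_summary_py_alt (summary_rows : List (String × String × String × String)) (version_map : List (String × String × String × Int)) : List String :=
  if summary_rows = [] then []
  else
    let teams : List String :=
      PySem.List.sorted (PySem.Set.ofList (summary_rows.map (fun r => r.1))) (fun x => x) false
    let version_by_team : PySem.Dict String Int :=
      version_map.foldl (fun d q => d.insert q.2.2.1 q.2.2.2) PySem.Dict.empty
    let body : List String :=
      teams.map (fun team =>
        let rows := summary_rows.filter (fun r => r.1 == team)
        let starters : PySem.Dict String String :=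
          rows.foldl (fun st r =>
            if r.2.2.1 == "1" && starterPositions.contains r.2.1 && !(st.contains r.2.1) then
              st.insert r.2.1 r.2.2.2
            else st) PySem.Dict.empty
        let cells := (starterPositions.filter (fun p => starters.contains p)).map
          (fun p => p ++ "1 " ++ starters.getD p "")
        let version_tag := match version_by_team.get? team with
          | some v => " v" ++ PySem.Int.toStr v
          | none => ""
        let cells_str := if cells = [] then "(no rank-1 entries)" else PySem.Str.join "  " cells
        "  " ++ pyLjust4 team ++ pyLjust4 version_tag ++ " " ++ cells_str ++ "  (" ++
          PySem.Int.toStr (rows.length : Int) ++ " entries)")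
    ("Loaded " ++ PySem.Int.toStr (teams.length : Int) ++ " team(s), " ++
      PySem.Int.toStr (summary_rows.length : Int) ++ " entries:") :: body

-- ===== PRECONDITION & SPEC =====
def Spec_format_team_summary_py (summary_rows : List (String × String × String × String)) (version_map : List (String × String × String × Int)) (out : List String) : Prop := out = format_team_summary_py_alt summary_rows version_map
instance (summary_rows : List (String × String × String × String)) (version_map : List (String × String × String × Int)) (out : List String) : Decidable (Spec_format_team_summary_py summary_rows version_map out) := by unfold Spec_format_team_summary_py; infer_instance

-- ===== CLAIM (what is proved, stated in full; the proofs are below) =====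
def Claim_equal_format_team_summary_py : Prop := ∀ (summary_rows : List (String × String × String × String)) (version_map : List (String × String × String × Int)), Dom_format_team_summary_py summary_rows version_map → Spec_format_team_summary_py summary_rows version_map (format_team_summary_py summary_rows version_map)

-- ===== LEMMAS AND PROOFS =====

-- reading one key out of a fold of modifys = folding over the rows filtered to that key
theorem getD_foldl_modify_filter {α ν : Type} (key : α → String) (f : α → ν → ν) (d0 : ν) :
    ∀ (l : List α) (d : PySem.Dict String ν) (c : String),
      (l.foldl (fun d r => d.modify (key r) d0 (f r)) d).getD c d0 =
        (l.filter (fun r => key r == c)).foldl (fun s r => f r s) (d.getD c d0) := by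
  intro l
  induction l with
  | nil => intro d c; rfl
  | cons r l ih =>
    intro d c
    simp only [List.foldl_cons, List.filter_cons]
    by_cases h : key r = c
    · subst h
      simp only [beq_self_eq_true, if_pos, List.foldl_cons, ih]
      congr 1
      simp [PySem.Dict.getD_modify_self]
    · have hb : (key r == c) = false := by simp [h]
      rw [hb]
      simp only [Bool.false_eq_true, if_false, ih]
      congr 1
      exact PySem.Dict.getD_modify_of_ne _ _ _ (Ne.symm h)

-- counting by +1 over a list is its length
theorem foldl_add_one_eq_length {α : Type} : ∀ (l : List α) (c : Int),
    l.foldl (fun c _ => c + 1) c = c + l.length := by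
  intro l
  induction l with
  | nil => intro c; simp
  | cons x l ih => intro c; simp [List.foldl_cons, ih]; omega

-- A's per-row starter update (setdefault) equals B's guarded insert, pointwise
theorem starter_step_eq (st : PySem.Dict String String) (r : String × String × String × String) :
    (if r.2.2.1 == "1" && starterPositions.contains r.2.1 then
        st.setdefault r.2.1 r.2.2.2 else st) =
    (if r.2.2.1 == "1" && starterPositions.contains r.2.1 && !(st.contains r.2.1) then
        st.insert r.2.1 r.2.2.2 else st) := by
  by_cases h : (r.2.2.1 == "1" && starterPositions.contains r.2.1) = true
  · rw [h]
    by_cases hc : st.contains r.2.1 = true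
    · simp [hc, PySem.Dict.setdefault_of_contains st r.2.2.2 hc]
    · simp only [Bool.not_eq_true] at hc
      simp [hc, PySem.Dict.setdefault_of_not_contains st r.2.2.2 hc]
  · simp only [Bool.not_eq_true] at h
    simp only [h, Bool.false_and, Bool.false_eq_true, if_false]

-- the dict entry A reads for a team = (number of that team's rows, B's starters fold)
theorem stats_eq (rows : List (String × String × String × String)) (team : String) :
    ((rows.foldl (fun d r =>
        d.modify r.1 ((0 : Int), (PySem.Dict.empty : PySem.Dict String String)) (fun stats =>
          (stats.1 + 1,
           if r.2.2.1 == "1" && starterPositions.contains r.2.1 then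
             stats.2.setdefault r.2.1 r.2.2.2
           else stats.2))) PySem.Dict.empty).getD team (0, PySem.Dict.empty)) =
      (((rows.filter (fun r => r.1 == team)).length : Int),
       (rows.filter (fun r => r.1 == team)).foldl (fun st r =>
          if r.2.2.1 == "1" && starterPositions.contains r.2.1 && !(st.contains r.2.1) then
            st.insert r.2.1 r.2.2.2
          else st) PySem.Dict.empty) := by
  have h1 :
      ((rows.foldl (fun d r =>
          d.modify r.1 ((0 : Int), (PySem.Dict.empty : PySem.Dict String String)) (fun stats =>
            (stats.1 + 1,
             if r.2.2.1 == "1" && starterPositions.contains r.2.1 then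
               stats.2.setdefault r.2.1 r.2.2.2
             else stats.2))) PySem.Dict.empty).getD team (0, PySem.Dict.empty)) =
        (rows.filter (fun r => r.1 == team)).foldl (fun s r =>
          (s.1 + 1,
           if r.2.2.1 == "1" && starterPositions.contains r.2.1 then
             s.2.setdefault r.2.1 r.2.2.2
           else s.2)) ((0 : Int), PySem.Dict.empty) :=
    getD_foldl_modify_filter (fun r => r.1)
      (fun r stats => (stats.1 + 1,
        if r.2.2.1 == "1" && starterPositions.contains r.2.1 then
          stats.2.setdefault r.2.1 r.2.2.2
        else stats.2)) ((0 : Int), PySem.Dict.empty) rows PySem.Dict.empty team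
  have h2 :
      (rows.filter (fun r => r.1 == team)).foldl (fun s r =>
          (s.1 + 1,
           if r.2.2.1 == "1" && starterPositions.contains r.2.1 then
             s.2.setdefault r.2.1 r.2.2.2
           else s.2)) ((0 : Int), PySem.Dict.empty) =
        ((rows.filter (fun r => r.1 == team)).foldl (fun c _ => c + 1) (0 : Int),
         (rows.filter (fun r => r.1 == team)).foldl (fun st r =>
           if r.2.2.1 == "1" && starterPositions.contains r.2.1 then
             st.setdefault r.2.1 r.2.2.2
           else st) PySem.Dict.empty) :=
    PySem.List.foldl_prod_mk (fun c _ => c + 1)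
      (fun st r => if r.2.2.1 == "1" && starterPositions.contains r.2.1 then
          st.setdefault r.2.1 r.2.2.2 else st)
      (rows.filter (fun r => r.1 == team)) 0 PySem.Dict.empty
  rw [h1, h2]
  refine Prod.ext ?_ ?_
  · rw [foldl_add_one_eq_length]; simp
  · exact PySem.List.foldl_congr_mem _ _ _ _ (fun st r _ => starter_step_eq st r)

-- the grouping dict's keys are the distinct teams, in first-occurrence order
theorem per_team_keys (summary_rows : List (String × String × String × String)) :
    ((summary_rows.foldl (fun d r =>
        d.modify r.1 ((0 : Int), (PySem.Dict.empty : PySem.Dict String String)) (fun stats =>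
          (stats.1 + 1,
           if r.2.2.1 == "1" && starterPositions.contains r.2.1 then
             stats.2.setdefault r.2.1 r.2.2.2
           else stats.2))) PySem.Dict.empty).keys)
      = PySem.Set.ofList (summary_rows.map (fun r => r.1)) := by
  have h := PySem.Dict.keys_foldl_modify_key summary_rows (fun r => r.1)
      ((0 : Int), (PySem.Dict.empty : PySem.Dict String String))
      (fun _ r stats => (stats.1 + 1,
        if r.2.2.1 == "1" && starterPositions.contains r.2.1 then
          stats.2.setdefault r.2.1 r.2.2.2
        else stats.2)) PySem.Dict.empty
  exact h.trans (by rw [PySem.Set.ofList_eq_foldl]; simp [PySem.Set.update, PySem.Dict.empty, PySem.Dict.keys])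

-- a dict's size is the length of its key list
theorem dict_size_eq_keys_length {κ ν : Type} (d : PySem.Dict κ ν) : d.size = d.keys.length := by
  simp [PySem.Dict.size, PySem.Dict.keys]

-- ===== VERDICT (by name: the statement is the Claim_ definition above) =====
theorem format_team_summary_py_spec : Claim_equal_format_team_summary_py := by
  intro summary_rows version_map _
  unfold Spec_format_team_summary_py format_team_summary_py format_team_summary_py_alt
  by_cases hnil : summary_rows = []
  · simp [hnil]
  · rw [if_neg hnil, if_neg hnil]
    simp only []
    congr 1
    · -- header
      congr 2
      rw [dict_size_eq_keys_length, per_team_keys summary_rows,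
          ← PySem.List.length_sorted (PySem.Set.ofList (summary_rows.map (fun r => r.1))) (fun x => x) false]
    · -- body
      rw [per_team_keys summary_rows]
      apply List.map_congr_left
      intro team _
      rw [stats_eq summary_rows team]
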